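-- pv_equiv track=rewrite | github.com/Ericliol/Advent-of-Code-2023 | 9-12-2023/task17_18.py | cal_nextval
-- ===== SOURCE A (Python) =====
-- def cal_nextval(nums:list)->int:
--     current = nums.copy()
--     lastVals = []
--     lastVals.append(current[-1])
--
--
--     while current.count(current[0]) != len(current):
--
--         next = [current[i+1] - current[i] for i in range(len(current)-1)]
--         lastVals.append(next[-1])
--         current = next
--
--     return sum(lastVals)
-- ===== SOURCE B (Python) =====
-- def cal_nextval(nums: list) -> int:
--     # Newton forward-difference closed form: next value = sum_j (-1)^(n-1-j) * C(n,j) * nums[j]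
--     n = len(nums)
--     total = 0
--     binom = 1  # C(n, j)
--     for j, x in enumerate(nums):
--         total += (binom if (n - 1 - j) % 2 == 0 else -binom) * x
--         binom = binom * (n - j) // (j + 1)
--     return total
-- ===== Notes on version B (the rewrite author's own statement) =====
-- stated objective: faster
-- what changed: Replaced the quadratic repeated-differencing loop by Newton's forward-difference closed form: a single pass computing sum_j (-1)^(n-1-j)*C(n,j)*nums[j] with binomial coefficients updated incrementally.
import Mathlib
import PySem

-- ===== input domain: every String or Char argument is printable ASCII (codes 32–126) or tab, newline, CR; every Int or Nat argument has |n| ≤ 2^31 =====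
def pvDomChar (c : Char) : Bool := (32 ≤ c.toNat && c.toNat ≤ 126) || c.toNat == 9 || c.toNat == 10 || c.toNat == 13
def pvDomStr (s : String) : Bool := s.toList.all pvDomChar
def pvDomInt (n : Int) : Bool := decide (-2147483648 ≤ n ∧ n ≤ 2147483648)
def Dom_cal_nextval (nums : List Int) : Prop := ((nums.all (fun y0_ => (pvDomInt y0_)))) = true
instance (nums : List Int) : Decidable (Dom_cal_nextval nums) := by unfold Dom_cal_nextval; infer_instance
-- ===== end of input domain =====

-- B replaces A's quadratic repeated-differencing loop by Newton's forward-difference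
-- closed form (one pass, alternating binomial sum); a timing run measures the speed claim.


-- ===== PORT A =====
-- next = [current[i+1] - current[i] for i in range(len(current)-1)]
-- (indices i and i+1 are always in range here, so the total pyGetD with junk default 0 is exact)
def pyDiff (current : List Int) : List Int :=
  (PySem.List.pyRange 0 (PySem.List.len current - 1) 1).map
    (fun i => PySem.List.pyGetD current (i + 1) 0 - PySem.List.pyGetD current i 0)

-- used by calGo's decreasing_by
theorem length_pyDiff (l : List Int) : (pyDiff l).length = l.length - 1 := by
  simp [pyDiff, PySem.List.length_pyRange_one]

-- the while loop of A, returning the final lastVals; the reads of current's head and of the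
-- last element of next are in range
-- whenever the loop body runs, so the total pyGetD forms are exact there
def calGo (current lastVals : List Int) : List Int :=
  if current.count (PySem.List.pyGetD current 0 0) ≠ current.length then
    let next := pyDiff current
    calGo next (lastVals ++ [PySem.List.pyGetD next (-1) 0])
  else
    lastVals
termination_by current.length
decreasing_by
  rcases current with _ | ⟨a, as⟩
  · simp at *
  · rw [length_pyDiff]; simp

def cal_nextval (nums : List Int) : Int :=
  -- current = nums.copy(); lastVals starts as the last element (IndexError on the empty list: excluded by Pre_)
  match PySem.List.pyGet? nums (-1) with
  | none => 0
  | some v => (calGo nums [v]).sum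

-- ===== PORT B =====
def cal_nextval_alt (nums : List Int) : Int :=
  let n : Int := PySem.List.len nums
  ((PySem.List.enumerate nums 0).foldl
    (fun (st : Int × Int) jx =>
      (st.1 + (if PySem.Int.mod (n - 1 - jx.1) 2 == 0 then st.2 else -st.2) * jx.2,
       PySem.Int.floordiv (st.2 * (n - jx.1)) (jx.1 + 1)))
    (0, 1)).1

-- ===== PRECONDITION & SPEC =====
-- Python A reads the last element of current first: it raises IndexError exactly on the empty list.
def Pre_cal_nextval (nums : List Int) : Prop := nums ≠ []
instance (nums : List Int) : Decidable (Pre_cal_nextval nums) := by unfold Pre_cal_nextval; infer_instance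
def pvWitness_cal_nextval : List Int := ([1, 3, 6, 10])

def Spec_cal_nextval (nums : List Int) (out : Int) : Prop := out = cal_nextval_alt nums
instance (nums : List Int) (out : Int) : Decidable (Spec_cal_nextval nums out) := by unfold Spec_cal_nextval; infer_instance

-- ===== CLAIM (what is proved, stated in full; the proofs are below) =====
def Claim_equal_cal_nextval : Prop := ∀ (nums : List Int), Dom_cal_nextval nums → Pre_cal_nextval nums → Spec_cal_nextval nums (cal_nextval nums)

-- ===== LEMMAS AND PROOFS =====

-- the closed-form value both programs compute: Newton's forward-difference extrapolation
def newton (l : List Int) : Int :=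
  ∑ j ∈ Finset.range l.length,
    (-1 : Int) ^ (l.length - 1 - j) * (l.length.choose j : Int) * l.getD j 0

theorem pyDiff_getD (l : List Int) (j : Nat) (hj : j < l.length - 1) :
    (pyDiff l).getD j 0 = l.getD (j + 1) 0 - l.getD j 0 := by
  rw [List.getD_eq_getElem _ _ (by rw [length_pyDiff]; omega)]
  simp [pyDiff, PySem.List.getElem_pyRange_one]
  have h2 : ((j : Int) + 1) = ((j + 1 : Nat) : Int) := by omega
  rw [h2, PySem.List.pyGetD_natCast, List.getD_eq_getElem?_getD]

-- the alternating-binomial reindexing identity behind 'newton l = last l + newton (diff l)'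
theorem key_identity (m : Nat) (x : Nat → Int) :
    ∑ j ∈ Finset.range (m + 2), (-1 : Int) ^ (m + 1 - j) * ((m + 2).choose j : Int) * x j
      = x (m + 1) + ∑ j ∈ Finset.range (m + 1),
          (-1 : Int) ^ (m - j) * ((m + 1).choose j : Int) * (x (j + 1) - x j) := by
  have hsplit : ∀ j ∈ Finset.range (m + 1),
      (-1 : Int) ^ (m - j) * ((m + 1).choose j : Int) * (x (j + 1) - x j)
        = (-1 : Int) ^ (m - j) * ((m + 1).choose j : Int) * x (j + 1)
          - (-1 : Int) ^ (m - j) * ((m + 1).choose j : Int) * x j := fun j _ => by ring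
  rw [Finset.sum_congr rfl hsplit, Finset.sum_sub_distrib]
  rw [Finset.sum_range_succ (fun j => (-1 : Int) ^ (m - j) * ((m + 1).choose j : Int) * x (j + 1))]
  rw [Finset.sum_range_succ' (fun j => (-1 : Int) ^ (m - j) * ((m + 1).choose j : Int) * x j)]
  rw [Finset.sum_range_succ (fun j => (-1 : Int) ^ (m + 1 - j) * ((m + 2).choose j : Int) * x j)]
  rw [Finset.sum_range_succ' (fun j => (-1 : Int) ^ (m + 1 - j) * ((m + 2).choose j : Int) * x j)]
  have hterm : ∀ j ∈ Finset.range m,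
      (-1 : Int) ^ (m + 1 - (j + 1)) * ((m + 2).choose (j + 1) : Int) * x (j + 1)
        = (-1 : Int) ^ (m - j) * ((m + 1).choose j : Int) * x (j + 1)
          - (-1 : Int) ^ (m - (j + 1)) * ((m + 1).choose (j + 1) : Int) * x (j + 1) := by
    intro j hj
    rw [Finset.mem_range] at hj
    have e1 : m + 1 - (j + 1) = m - j := by omega
    have e2 : m - j = (m - (j + 1)) + 1 := by omega
    rw [e1, e2, pow_succ, Nat.choose_succ_succ (m + 1) j]
    push_cast
    ring
  have hsum : ∑ j ∈ Finset.range m,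
        (-1 : Int) ^ (m + 1 - (j + 1)) * ((m + 2).choose (j + 1) : Int) * x (j + 1)
      = (∑ j ∈ Finset.range m, (-1 : Int) ^ (m - j) * ((m + 1).choose j : Int) * x (j + 1))
        - ∑ j ∈ Finset.range m, (-1 : Int) ^ (m - (j + 1)) * ((m + 1).choose (j + 1) : Int) * x (j + 1) := by
    rw [← Finset.sum_sub_distrib]
    exact Finset.sum_congr rfl hterm
  rw [hsum]
  simp [Nat.choose_succ_self_right, pow_succ]
  ring

theorem newton_rec (l : List Int) (hl : 2 ≤ l.length) :
    newton l = l.getD (l.length - 1) 0 + newton (pyDiff l) := by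
  obtain ⟨m, hm⟩ : ∃ m, l.length = m + 2 := ⟨l.length - 2, by omega⟩
  unfold newton
  rw [length_pyDiff, hm]
  have hdiff : ∀ j ∈ Finset.range (m + 2 - 1),
      (-1 : Int) ^ (m + 2 - 1 - 1 - j) * ((m + 2 - 1).choose j : Int) * (pyDiff l).getD j 0
        = (-1 : Int) ^ (m - j) * ((m + 1).choose j : Int) * (l.getD (j + 1) 0 - l.getD j 0) := by
    intro j hj
    rw [Finset.mem_range] at hj
    rw [pyDiff_getD l j (by omega)]
    norm_num
  rw [Finset.sum_congr rfl hdiff]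
  have := key_identity m (fun j => l.getD j 0)
  simpa using this

theorem newton_const (l : List Int) (hne : l ≠ []) (hc : ∀ b ∈ l, l.getD 0 0 = b) :
    newton l = l.getD (l.length - 1) 0 := by
  rcases Nat.lt_or_ge l.length 2 with h2 | h2
  · rcases l with _ | ⟨a, _ | ⟨b, t⟩⟩
    · exact absurd rfl hne
    · simp [newton]
    · simp at h2
  · rw [newton_rec l h2]
    have hz : newton (pyDiff l) = 0 := by
      unfold newton
      apply Finset.sum_eq_zero
      intro j hj
      rw [Finset.mem_range, length_pyDiff] at hj
      rw [pyDiff_getD l j (by omega)]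
      have e1 : l.getD (j + 1) 0 = l.getD 0 0 := by
        rw [List.getD_eq_getElem _ _ (by omega)]
        exact (hc _ (List.getElem_mem _)).symm
      have e2 : l.getD j 0 = l.getD 0 0 := by
        rw [List.getD_eq_getElem _ _ (by omega)]
        exact (hc _ (List.getElem_mem _)).symm
      rw [e1, e2]
      ring
    rw [hz]; ring

theorem cond_len2 (cur : List Int)
    (h : cur.count (PySem.List.pyGetD cur 0 0) ≠ cur.length) : 2 ≤ cur.length := by
  rcases cur with _ | ⟨a, _ | ⟨b, t⟩⟩
  · simp at h
  · simp [PySem.List.pyGetD_zero_cons] at h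
  · simp

theorem getD_last_eq (l : List Int) (hne : l ≠ []) :
    PySem.List.pyGetD l (-1) 0 = l.getD (l.length - 1) 0 := by
  rw [PySem.List.pyGetD_neg_one l 0 hne, List.getLast_eq_getElem,
    List.getD_eq_getElem _ _ (by have := List.length_pos_of_ne_nil hne; omega)]

theorem calGo_sum (cur acc : List Int) (hne : cur ≠ []) :
    (calGo cur acc).sum = acc.sum + newton cur - cur.getD (cur.length - 1) 0 := by
  induction cur, acc using calGo.induct with
  | case1 cur acc h next ih =>
    have h2 : 2 ≤ cur.length := cond_len2 cur h
    have hlen := length_pyDiff cur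
    have hdne : pyDiff cur ≠ [] := by
      intro hnil
      rw [hnil] at hlen
      simp at hlen
      omega
    rw [calGo, if_pos h]
    rw [ih hdne]
    rw [List.sum_append, List.sum_cons, List.sum_nil]
    rw [getD_last_eq next hdne]
    have hrec := newton_rec cur h2
    have : newton next = newton cur - cur.getD (cur.length - 1) 0 := by
      show newton (pyDiff cur) = _
      omega
    rw [this]
    ring
  | case2 cur acc h =>
    rw [calGo, if_neg h]
    have hc : ∀ b ∈ cur, PySem.List.pyGetD cur 0 0 = b := List.count_eq_length.mp (not_not.mp h)
    rw [PySem.List.pyGetD_zero] at hc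
    rw [newton_const cur hne hc]
    ring

theorem sign_eq (N j : Nat) (c : Int) (hj : j < N) :
    (if PySem.Int.mod ((N : Int) - 1 - (j : Int)) 2 == 0 then c else -c)
      = (-1 : Int) ^ (N - 1 - j) * c := by
  have e : (N : Int) - 1 - (j : Int) = ((N - 1 - j : Nat) : Int) := by omega
  rw [e]
  rw [show ((2 : Int)) = ((2 : Nat) : Int) from rfl, PySem.Int.mod_natCast]
  rcases Nat.even_or_odd (N - 1 - j) with he | ho
  · rw [he.neg_one_pow]
    have : (N - 1 - j) % 2 = 0 := Nat.even_iff.mp he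
    simp [this]
  · rw [ho.neg_one_pow]
    have : (N - 1 - j) % 2 = 1 := Nat.odd_iff.mp ho
    simp [this]

theorem binom_step (N j : Nat) (hj : j < N) :
    PySem.Int.floordiv ((N.choose j : Int) * ((N : Int) - (j : Int))) ((j : Int) + 1)
      = (N.choose (j + 1) : Int) := by
  have e1 : (N : Int) - (j : Int) = ((N - j : Nat) : Int) := by omega
  have e2 : ((j : Int) + 1) = ((j + 1 : Nat) : Int) := by omega
  rw [e1, e2, show (N.choose j : Int) * ((N - j : Nat) : Int) = ((N.choose j * (N - j) : Nat) : Int) by push_cast; ring]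
  rw [PySem.Int.floordiv_natCast]
  rw [← Nat.choose_succ_right_eq]
  rw [Nat.mul_div_cancel _ (by omega)]

theorem foldB (N : Nat) (tail : List Int) :
    ∀ (j : Nat) (total : Int), j + tail.length ≤ N →
    ((PySem.List.enumerate tail (j : Int)).foldl
      (fun (st : Int × Int) jx =>
        (st.1 + (if PySem.Int.mod ((N : Int) - 1 - jx.1) 2 == 0 then st.2 else -st.2) * jx.2,
         PySem.Int.floordiv (st.2 * ((N : Int) - jx.1)) (jx.1 + 1)))
      (total, (N.choose j : Int))).1
      = total + ∑ i ∈ Finset.range tail.length,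
          (-1 : Int) ^ (N - 1 - (j + i)) * (N.choose (j + i) : Int) * tail.getD i 0 := by
  induction tail with
  | nil => intro j total _; simp [PySem.List.enumerate_nil]
  | cons x xs ih =>
    intro j total hle
    simp only [List.length_cons] at hle
    rw [PySem.List.enumerate_cons, List.foldl_cons]
    have hjN : j < N := by omega
    rw [sign_eq N j _ hjN, binom_step N j hjN]
    rw [show ((j : Int) + 1) = ((j + 1 : Nat) : Int) by omega]
    rw [ih (j + 1) _ (by omega)]
    rw [List.length_cons, Finset.sum_range_succ']
    simp only [List.getD_cons_succ, List.getD_cons_zero]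
    have hsh : ∀ i, (j + 1) + i = j + (i + 1) := by omega
    rw [Finset.sum_congr rfl (fun i _ => by rw [hsh i])]
    simp only [Nat.add_zero]
    ring

theorem alt_eq_newton (l : List Int) : cal_nextval_alt l = newton l := by
  have h := foldB l.length l 0 0 (by omega)
  simp only [Nat.choose_zero_right, Nat.cast_one, Nat.cast_zero, zero_add] at h
  unfold cal_nextval_alt
  rw [PySem.List.len_eq]
  rw [h]
  simp [newton]

-- ===== VERDICT (by name: the statement is the Claim_ definition above) =====
theorem cal_nextval_spec : Claim_equal_cal_nextval := by
  intro nums _ hpre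
  unfold Spec_cal_nextval
  have hne : nums ≠ [] := hpre
  rw [alt_eq_newton]
  unfold cal_nextval
  rw [PySem.List.pyGet?_neg_one, List.getLast?_eq_some_getLast hne]
  show (calGo nums [nums.getLast hne]).sum = newton nums
  rw [calGo_sum nums _ hne]
  have hlast : nums.getLast hne = nums.getD (nums.length - 1) 0 := by
    rw [List.getLast_eq_getElem,
      List.getD_eq_getElem _ _ (by have := List.length_pos_of_ne_nil hne; omega)]
  simp [hlast]
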